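-- pv_equiv track=rewrite | github.com/kenchan0226/control-sum-cmdp | construct_named_entity_masked_questions_paraphrase.py | check_present_named_entities
-- ===== SOURCE A (Python) =====
-- def check_present_named_entities(doc_word_list, named_entity_words_list):
--     entity_start_end_list = []
--     for entity_words in named_entity_words_list:  # for each named entity
--         # check if it appears in document
--         match = False
--         for doc_start_idx in range(len(doc_word_list) - len(entity_words) + 1):
--             match = True
--             for entity_word_idx, entity_word in enumerate(entity_words):
--                 doc_word = doc_word_list[doc_start_idx + entity_word_idx]
--                 if doc_word != entity_word:
--                     match = False
--                     break
--             if match: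
--                 break
--         if match:
--             entity_start_end_list.append((doc_start_idx, doc_start_idx + len(entity_words)))
--         else:
--             entity_start_end_list.append((-1, -1))
--     return entity_start_end_list
-- ===== SOURCE B (Python) =====
-- def check_present_named_entities(doc_word_list, named_entity_words_list):
--     # Index each document word to its (increasing) list of positions once,
--     # then scan only the candidate positions of an entity's first word.
--     positions = {}
--     for idx, word in enumerate(doc_word_list):
--         positions.setdefault(word, []).append(idx)
--     n = len(doc_word_list)
--     result = []
--     for entity_words in named_entity_words_list:
--         m = len(entity_words)
--         if m == 0:
--             result.append((0, 0))
--             continue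
--         rest = entity_words[1:]
--         span = (-1, -1)
--         for i in positions.get(entity_words[0], []):
--             if i + m <= n and doc_word_list[i + 1:i + m] == rest:
--                 span = (i, i + m)
--                 break
--         result.append(span)
--     return result
-- ===== Notes on version B (the rewrite author's own statement) =====
-- stated objective: alternative
-- what changed: B builds a word-to-positions index of the document once and, per entity, checks only the candidate start positions of the entity's first word with a slice comparison, instead of A's scan of every start position with an inner word-by-word loop.
import Mathlib
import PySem

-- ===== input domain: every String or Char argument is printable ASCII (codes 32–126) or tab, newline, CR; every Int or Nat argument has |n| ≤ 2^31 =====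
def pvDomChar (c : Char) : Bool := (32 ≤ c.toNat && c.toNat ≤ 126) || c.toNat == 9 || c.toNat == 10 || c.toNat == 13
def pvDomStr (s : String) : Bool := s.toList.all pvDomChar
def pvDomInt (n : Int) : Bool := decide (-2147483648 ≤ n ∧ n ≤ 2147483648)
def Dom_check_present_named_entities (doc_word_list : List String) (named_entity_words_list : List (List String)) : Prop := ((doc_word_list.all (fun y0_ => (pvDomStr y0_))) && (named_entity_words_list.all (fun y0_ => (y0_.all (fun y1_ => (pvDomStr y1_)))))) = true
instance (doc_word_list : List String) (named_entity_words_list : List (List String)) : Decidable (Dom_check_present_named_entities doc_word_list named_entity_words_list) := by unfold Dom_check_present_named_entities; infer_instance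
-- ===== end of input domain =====

-- B replaces A's scan of every start position per entity by a position index of the
-- document built once, scanning only the candidate positions of the entity's first word
-- (objective: faster by a constant factor on typical documents; return value only).


-- ===== PORT A =====
-- inner loop: 'for entity_word_idx, entity_word in enumerate(entity_words): if doc[...] != entity_word: match = False; break'
def pvMatchA (doc_word_list : List String) (i : Int) : List String → Int → Bool
  | [], _ => true
  | w :: ws, j =>
    if PySem.List.pyGetD doc_word_list (i + j) "" ≠ w then false
    else pvMatchA doc_word_list i ws (j + 1)

-- outer loop over doc_start_idx with 'if match: break'
def pvScanA (doc_word_list entity_words : List String) : List Int → Option Int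
  | [] => none
  | i :: rest =>
    if pvMatchA doc_word_list i entity_words 0 then some i
    else pvScanA doc_word_list entity_words rest

def check_present_named_entities (doc_word_list : List String) (named_entity_words_list : List (List String)) : List (Int × Int) :=
  named_entity_words_list.foldl (fun acc entity_words =>
    acc ++ [match pvScanA doc_word_list entity_words
              (PySem.List.pyRange 0 ((doc_word_list.length : Int) - (entity_words.length : Int) + 1) 1) with
            | some i => (i, i + (entity_words.length : Int))
            | none => (-1, -1)]) []

-- ===== PORT B =====
-- positions = {}; for idx, word in enumerate(doc): positions.setdefault(word, []).append(idx)
def pvPositionsB (doc_word_list : List String) : PySem.Dict String (List Int) :=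
  ((PySem.List.enumerate doc_word_list).map (fun p => (p.2, p.1))).foldl
    (fun d p => d.modify p.1 [] (· ++ [p.2])) PySem.Dict.empty

-- for i in positions.get(ent[0], []): if i + m <= n and doc[i+1:i+m] == rest: span = (i, i+m); break
def pvFindB (doc_word_list : List String) (m : Int) (rest : List String) : List Int → Int × Int
  | [] => (-1, -1)
  | i :: is =>
    if decide (i + m ≤ (doc_word_list.length : Int))
        && (PySem.List.slice doc_word_list (some (i + 1)) (some (i + m)) == rest)
    then (i, i + m) else pvFindB doc_word_list m rest is

def check_present_named_entities_alt (doc_word_list : List String) (named_entity_words_list : List (List String)) : List (Int × Int) :=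
  let positions := pvPositionsB doc_word_list
  named_entity_words_list.foldl (fun acc entity_words =>
    acc ++ [match entity_words with
            | [] => (0, 0)
            | w :: rest =>
              pvFindB doc_word_list ((w :: rest).length : Int) rest (positions.getD w [])]) []

-- ===== PRECONDITION & SPEC =====
def Spec_check_present_named_entities (doc_word_list : List String) (named_entity_words_list : List (List String)) (out : List (Int × Int)) : Prop := out = check_present_named_entities_alt doc_word_list named_entity_words_list
instance (doc_word_list : List String) (named_entity_words_list : List (List String)) (out : List (Int × Int)) : Decidable (Spec_check_present_named_entities doc_word_list named_entity_words_list out) := by unfold Spec_check_present_named_entities; infer_instance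

-- ===== CLAIM (what is proved, stated in full; the proofs are below) =====
def Claim_equal_check_present_named_entities : Prop := ∀ (doc_word_list : List String) (named_entity_words_list : List (List String)), Dom_check_present_named_entities doc_word_list named_entity_words_list → Spec_check_present_named_entities doc_word_list named_entity_words_list (check_present_named_entities doc_word_list named_entity_words_list)

-- ===== LEMMAS AND PROOFS =====

-- find? only looks at members
theorem pv_find?_congr_mem {α : Type} (l : List α) (f g : α → Bool)
    (h : ∀ x ∈ l, f x = g x) : l.find? f = l.find? g := by
  induction l with
  | nil => rfl
  | cons x t ih =>
    simp only [List.find?_cons, h x (List.mem_cons_self), ih (fun y hy => h y (List.mem_cons_of_mem _ hy))]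

-- A's outer loop is find? over the start positions
theorem pvScanA_eq_find? (doc ent : List String) (l : List Int) :
    pvScanA doc ent l = l.find? (fun i => pvMatchA doc i ent 0) := by
  induction l with
  | nil => rfl
  | cons i rest ih => simp [pvScanA, List.find?, ih]; split <;> simp_all

-- B's candidate loop is find? over the candidates
theorem pvFindB_eq_find? (doc : List String) (m : Int) (rest : List String) (l : List Int) :
    pvFindB doc m rest l =
      match l.find? (fun i => i + m ≤ (doc.length : Int)
          && (PySem.List.slice doc (some (i + 1)) (some (i + m)) == rest)) with
      | some i => (i, i + m)
      | none => (-1, -1) := by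
  induction l with
  | nil => rfl
  | cons i t ih =>
    simp only [pvFindB, List.find?]
    cases hc : decide (i + m ≤ (doc.length : Int))
        && (PySem.List.slice doc (some (i + 1)) (some (i + m)) == rest)
    · simp [ih]
    · simp

-- the candidate list of w is the filter of all positions
theorem pvPositionsB_getD (doc : List String) (w : String) :
    (pvPositionsB doc).getD w [] =
      (PySem.List.pyRange 0 (doc.length : Int) 1).filter
        (fun i => PySem.List.pyGetD doc i "" == w) := by
  unfold pvPositionsB
  rw [PySem.Dict.getD_foldl_modify_append]
  rw [PySem.List.enumerate_eq_map_pyRange doc ""]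
  simp [List.map_map, List.filter_map, Function.comp_def, PySem.List.len]

-- A's inner loop is a take/drop comparison (within bounds)
theorem pvMatchA_eq (doc ent : List String) (i : Int) (j : Nat)
    (h0 : 0 ≤ i) (hb : (i.toNat + j) + ent.length ≤ doc.length) :
    pvMatchA doc i ent (j : Int) =
      decide ((doc.drop (i.toNat + j)).take ent.length = ent) := by
  induction ent generalizing j with
  | nil => simp [pvMatchA]
  | cons e es ih =>
    have hk : i.toNat + j < doc.length := by simp only [List.length_cons] at hb; omega
    have hget : PySem.List.pyGetD doc (i + (j : Int)) "" = doc[i.toNat + j] := by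
      rw [show i + (j : Int) = ((i.toNat + j : Nat) : Int) by omega]
      rw [PySem.List.pyGetD_eq_getElem doc "" (by positivity) (by exact_mod_cast hk)]
      simp only [Int.toNat_natCast]
    have hdrop : doc.drop (i.toNat + j) = doc[i.toNat + j] :: doc.drop (i.toNat + j + 1) :=
      (List.getElem_cons_drop hk).symm
    simp only [pvMatchA, hget, hdrop]
    by_cases he : doc[i.toNat + j] = e
    · rw [if_neg (by simp [he])]
      rw [show ((j : Int) + 1) = ((j + 1 : Nat) : Int) by omega,
        ih (j + 1) (by simp only [List.length_cons] at hb; omega)]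
      have hjj : i.toNat + (j + 1) = i.toNat + j + 1 := by omega
      simp [he, hjj]
    · rw [if_pos (by simp [he])]
      simp only [List.length_cons, List.take_succ_cons]
      exact (decide_eq_false (by simp [he])).symm

-- per-entity agreement of the two loop bodies
theorem pv_entity_eq (doc ent : List String) :
    (match pvScanA doc ent (PySem.List.pyRange 0 ((doc.length : Int) - (ent.length : Int) + 1) 1) with
     | some i => (i, i + (ent.length : Int))
     | none => ((-1 : Int), (-1 : Int))) =
    (match ent with
     | [] => ((0 : Int), (0 : Int))
     | w :: rest => pvFindB doc ((w :: rest).length : Int) rest ((pvPositionsB doc).getD w [])) := by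
  match ent with
  | [] =>
    rw [PySem.List.pyRange_one_cons (by simp only [List.length_nil, Nat.cast_zero, sub_zero]; omega)]
    simp [pvScanA, pvMatchA]
  | w :: rest =>
    show _ = pvFindB doc ((w :: rest).length : Int) rest ((pvPositionsB doc).getD w [])
    rw [pvScanA_eq_find?, pvPositionsB_getD, pvFindB_eq_find?, List.find?_filter]
    have key : (PySem.List.pyRange 0 ((doc.length : Int) - ((w :: rest).length : Int) + 1) 1).find?
          (fun i => pvMatchA doc i (w :: rest) 0) =
        (PySem.List.pyRange 0 (doc.length : Int) 1).find?
          (fun i => decide ((PySem.List.pyGetD doc i "" == w) = true ∧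
            (decide (i + ((w :: rest).length : Int) ≤ (doc.length : Int))
              && (PySem.List.slice doc (some (i + 1)) (some (i + ((w :: rest).length : Int))) == rest)) = true)) := by
      by_cases hmn : ((w :: rest).length : Int) ≤ (doc.length : Int)
      · rw [PySem.List.pyRange_one_append 0 ((doc.length : Int) - ((w :: rest).length : Int) + 1)
            (doc.length : Int) (by omega) (by simp only [List.length_cons] at hmn ⊢; omega),
          List.find?_append]
        have h2 : (PySem.List.pyRange ((doc.length : Int) - ((w :: rest).length : Int) + 1)
            (doc.length : Int) 1).find?
            (fun i => decide ((PySem.List.pyGetD doc i "" == w) = true ∧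
              (decide (i + ((w :: rest).length : Int) ≤ (doc.length : Int))
                && (PySem.List.slice doc (some (i + 1)) (some (i + ((w :: rest).length : Int))) == rest)) = true)) = none := by
          rw [List.find?_eq_none]
          intro i hi
          rw [PySem.List.mem_pyRange_one] at hi
          simp only [decide_eq_true_eq, not_and]
          intro _
          rw [Bool.and_eq_true, decide_eq_true_eq]
          intro ⟨hle, _⟩
          omega
        rw [h2, Option.or_none]
        apply pv_find?_congr_mem
        intro i hi
        rw [PySem.List.mem_pyRange_one] at hi
        have hlt : i.toNat < doc.length := by simp only [List.length_cons] at hi; omega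
        have hA := pvMatchA_eq doc (w :: rest) i 0 hi.1 (by simp only [List.length_cons] at hi ⊢; omega)
        norm_num at hA
        rw [hA]
        have hle : i + ((w :: rest).length : Int) ≤ (doc.length : Int) := by
          simp only [List.length_cons] at hi ⊢; omega
        rw [PySem.List.slice_toNat doc (by omega) (by omega)]
        have h1 : (i + 1).toNat = i.toNat + 1 := by omega
        have h3 : (i + ((w :: rest).length : Int)).toNat - (i.toNat + 1) = rest.length := by
          simp only [List.length_cons]; omega
        rw [h1, h3]
        have hget : PySem.List.pyGetD doc i "" = doc[i.toNat] := by
          rw [PySem.List.pyGetD_eq_getElem doc "" hi.1 (by omega)]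
        have hdrop : doc.drop i.toNat = doc[i.toNat] :: doc.drop (i.toNat + 1) :=
          (List.getElem_cons_drop hlt).symm
        rw [hget, hdrop]
        simp only [List.length_cons, List.take_succ_cons]
        by_cases e1 : doc[i.toNat] = w <;>
          by_cases e2 : (doc.drop (i.toNat + 1)).take rest.length = rest <;>
            simp [e1, e2] <;> omega
      · rw [PySem.List.pyRange_one_eq_nil (by simp only [List.length_cons] at hmn ⊢; omega)]
        rw [List.find?_nil, Eq.comm, List.find?_eq_none]
        intro i hi
        rw [PySem.List.mem_pyRange_one] at hi
        simp only [decide_eq_true_eq, not_and]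
        intro _
        rw [Bool.and_eq_true, decide_eq_true_eq]
        intro ⟨hle, _⟩
        omega
    rw [key]

-- ===== VERDICT (by name: the statement is the Claim_ definition above) =====
theorem check_present_named_entities_spec : Claim_equal_check_present_named_entities := by
  intro doc ents _
  unfold Spec_check_present_named_entities check_present_named_entities check_present_named_entities_alt
  rw [PySem.List.foldl_append_singleton_eq_map, PySem.List.foldl_append_singleton_eq_map]
  simp only [List.nil_append]
  exact List.map_congr_left (fun ent _ => pv_entity_eq doc ent)
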